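-- pv_equiv track=rewrite | github.com/GaneshMSundaram/Hypermatrix-Superset | superset/databases/sql_query_builder_prerequisite.py | get_table_list_with_alias
-- ===== SOURCE A (Python) =====
-- def get_table_list_with_alias(path: list):
--     table_list = {}
--     table_list_alias = {}
--     count = 1
--
--     for i in range(len(path)):
--         for j in range(len(path[i])):
--             if not path[i][j] in table_list:
--                 table_list[path[i][j]] = path[i][j]
--                 table_list_alias[path[i][j]] = "T-" + str(count)  # like T-1, T-2 etc
--                 count += 1
--
--     return table_list, table_list_alias
-- ===== SOURCE B (Python) =====
-- def get_table_list_with_alias(path: list):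
--     # Index phase: walk all tokens in REVERSE, overwriting first[tok] = position;
--     # the last write (smallest position) wins, so first maps each token to its
--     # first-occurrence index -- no membership test, no running counter.
--     toks = [t for row in path for t in row]
--     first = {}
--     for i, t in reversed(list(enumerate(toks))):
--         first[t] = i
--     # Order phase: sort the tokens by their first-occurrence index.
--     ordered = sorted(first, key=first.get)
--     # Construct phase: each result dict in its own pass over the ordered index.
--     table_list = {t: t for t in ordered}
--     table_list_alias = {t: "T-" + str(i + 1) for i, t in enumerate(ordered)}
--     return table_list, table_list_alias
-- ===== Notes on version B (the rewrite author's own statement) =====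
-- stated objective: alternative
-- what changed: Replaces A's fused nested loop with membership test and running counter by a sort-based pipeline: a reverse pass overwrites first[tok]=index (last write wins = first occurrence, no membership test), the tokens are then sorted by that first-occurrence index, and the two dicts are built in separate passes over the sorted list.
import Mathlib
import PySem

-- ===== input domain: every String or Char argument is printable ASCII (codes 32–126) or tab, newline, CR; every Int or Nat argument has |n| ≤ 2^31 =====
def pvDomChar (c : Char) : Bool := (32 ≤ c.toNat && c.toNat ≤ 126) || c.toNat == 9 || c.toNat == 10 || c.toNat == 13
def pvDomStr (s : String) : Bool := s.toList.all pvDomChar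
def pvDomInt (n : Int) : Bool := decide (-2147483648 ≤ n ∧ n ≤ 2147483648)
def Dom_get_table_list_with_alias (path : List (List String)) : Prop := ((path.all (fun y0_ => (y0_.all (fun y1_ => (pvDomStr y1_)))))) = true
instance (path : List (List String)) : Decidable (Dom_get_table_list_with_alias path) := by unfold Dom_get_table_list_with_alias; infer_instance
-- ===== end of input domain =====

-- B is a different algorithm: a reverse pass records each token's first-occurrence index
-- (last write wins, no membership test), then sorting by that index yields the dedup order.

-- ===== PORT A =====
-- literal port of A's index-based nested loop with state (table_list, table_list_alias, count)
def get_table_list_with_alias (path : List (List String)) : (List (String × String)) × (List (String × String)) :=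
  let res := (PySem.List.pyRange 0 (path.length : Int) 1).foldl
    (fun st i =>
      let row := PySem.List.pyGetD path i []
      (PySem.List.pyRange 0 (row.length : Int) 1).foldl
        (fun st j =>
          let t := PySem.List.pyGetD row j ""
          if st.1.contains t then st
          else (st.1.insert t t,
                st.2.1.insert t ("T-" ++ PySem.Int.toStr st.2.2),
                st.2.2 + 1))
        st)
    ((PySem.Dict.empty : PySem.Dict String String),
     (PySem.Dict.empty : PySem.Dict String String), (1 : Int))
  (res.1.items, res.2.1.items)

-- ===== PORT B =====
-- Source B's reverse-overwrite loop: for i, t in reversed(list(enumerate(toks))): first[t] = i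
def pvFirst (toks : List String) : PySem.Dict String Int :=
  (PySem.List.enumerate toks 0).reverse.foldl
    (fun d p => d.insert p.2 p.1) (PySem.Dict.empty : PySem.Dict String Int)

def get_table_list_with_alias_alt (path : List (List String)) : (List (String × String)) × (List (String × String)) :=
  let toks := path.flatMap (fun row => row)
  let first := pvFirst toks
  let ordered := PySem.List.sorted first.keys (fun t => first.getD t 0) false
  (ordered.map (fun t => (t, t)),
   (PySem.List.enumerate ordered 0).map (fun p => (p.2, "T-" ++ PySem.Int.toStr (p.1 + 1))))

-- ===== PRECONDITION & SPEC =====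
def Spec_get_table_list_with_alias (path : List (List String)) (out : (List (String × String)) × (List (String × String))) : Prop := out = get_table_list_with_alias_alt path
instance (path : List (List String)) (out : (List (String × String)) × (List (String × String))) : Decidable (Spec_get_table_list_with_alias path out) := by unfold Spec_get_table_list_with_alias; infer_instance

-- ===== CLAIM (what is proved, stated in full; the proofs are below) =====
def Claim_equal_get_table_list_with_alias : Prop := ∀ (path : List (List String)), Dom_get_table_list_with_alias path → Spec_get_table_list_with_alias path (get_table_list_with_alias path)

-- ===== LEMMAS AND PROOFS =====

-- the abstract state of A's loop after having seen exactly the distinct tokens s (in order)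
def pvState (s : List String) : PySem.Dict String String × PySem.Dict String String × Int :=
  (PySem.Dict.mk (s.map (fun t => (t, t))),
   PySem.Dict.mk ((PySem.List.enumerate s 0).map (fun p => (p.2, "T-" ++ PySem.Int.toStr (p.1 + 1)))),
   (s.length : Int) + 1)

-- A's loop body, as a function of state and token
def pvStep (st : PySem.Dict String String × PySem.Dict String String × Int) (t : String) :
    PySem.Dict String String × PySem.Dict String String × Int :=
  if st.1.contains t then st
  else (st.1.insert t t, st.2.1.insert t ("T-" ++ PySem.Int.toStr st.2.2), st.2.2 + 1)

theorem pvStep_state (s : List String) (x : String) :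
    pvStep (pvState s) x = pvState (PySem.Set.add s x) := by
  unfold pvStep pvState PySem.Set.add
  by_cases hx : x ∈ s
  · have h1 : (PySem.Dict.mk (s.map (fun t => (t, t)))).contains x = true := by
      simp only [PySem.Dict.contains_mk, List.any_map, List.any_eq_true, Function.comp]
      exact ⟨x, hx, by simp⟩
    simp [h1, hx]
  · have h1 : (PySem.Dict.mk (s.map (fun t => (t, t)))).contains x = false := by
      simp [PySem.Dict.contains_mk, List.any_map]
      intro a ha h; exact hx (h ▸ ha)
    have h2 : (PySem.Dict.mk ((PySem.List.enumerate s 0).map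
        (fun p => (p.2, "T-" ++ PySem.Int.toStr (p.1 + 1))))).contains x = false := by
      simp [PySem.Dict.contains_mk, List.any_map]
      intro a b hab h
      have hmem : b ∈ s := by
        have hm := PySem.List.map_snd_enumerate s 0
        exact hm ▸ List.mem_map_of_mem (f := fun p => p.2) hab
      exact hx (h ▸ hmem)
    simp only [h1, Bool.false_eq_true, if_false, Prod.mk.injEq]
    refine ⟨?_, ?_, by simp [hx]⟩
    · apply PySem.Dict.ext
      rw [PySem.Dict.items_insert_of_not_contains _ _ h1]
      simp [hx]
    · apply PySem.Dict.ext
      rw [PySem.Dict.items_insert_of_not_contains _ _ h2]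
      simp [hx, PySem.List.enumerate_append]

theorem pvFold_state (xs : List String) (s : List String) :
    xs.foldl pvStep (pvState s) = pvState (xs.foldl PySem.Set.add s) := by
  induction xs generalizing s with
  | nil => rfl
  | cons x xs ih => simp [List.foldl_cons, pvStep_state, ih]

theorem pvInner_eq (row : List String)
    (st : PySem.Dict String String × PySem.Dict String String × Int) :
    (PySem.List.pyRange 0 (row.length : Int) 1).foldl
      (fun st j =>
        if st.1.contains (PySem.List.pyGetD row j "") then st
        else (st.1.insert (PySem.List.pyGetD row j "") (PySem.List.pyGetD row j ""),
              st.2.1.insert (PySem.List.pyGetD row j "") ("T-" ++ PySem.Int.toStr st.2.2),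
              st.2.2 + 1)) st
    = row.foldl pvStep st :=
  PySem.List.foldl_pyRange_zero_pyGetD' row "" pvStep st

-- B side: the fold of inserts is "last write wins"
theorem pvFoldInsert_get? (l : List (Int × String)) (d : PySem.Dict String Int) (t : String) :
    (l.foldl (fun d p => d.insert p.2 p.1) d).get? t =
      match l.reverse.find? (fun p => p.2 == t) with
      | some p => some p.1
      | none => d.get? t := by
  induction l generalizing d with
  | nil => simp
  | cons p l ih =>
    simp only [List.foldl_cons, ih, List.reverse_cons, List.find?_append]
    cases h : l.reverse.find? (fun p => p.2 == t) with
    | some q => simp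
    | none =>
      by_cases hp : p.2 = t
      · subst hp; simp [List.find?, PySem.Dict.get?_insert_self]
      · have hb : (p.2 == t) = false := by simp [hp]
        simp [List.find?, hb, PySem.Dict.get?_insert_of_ne _ _ (Ne.symm hp)]

theorem pvFind_enumerate (toks : List String) (s : Int) (t : String) (h : t ∈ toks) :
    (PySem.List.enumerate toks s).find? (fun p => p.2 == t)
      = some (s + (toks.idxOf t : Int), t) := by
  induction toks generalizing s with
  | nil => cases h
  | cons a l ih =>
    rw [PySem.List.enumerate_cons]
    by_cases ha : a = t
    · subst ha; simp [List.find?]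
    · have ht : t ∈ l := by
        cases h with
        | head => exact absurd rfl ha
        | tail _ h' => exact h'
      rw [List.find?_cons_of_neg (by simp [ha]), ih (s + 1) ht,
        List.idxOf_cons_ne _ (by exact ha)]
      congr 1
      push_cast
      ring_nf

theorem pvFirst_get? (toks : List String) (t : String) (h : t ∈ toks) :
    (pvFirst toks).get? t = some ((toks.idxOf t : Nat) : Int) := by
  unfold pvFirst
  rw [pvFoldInsert_get? _ _ t, List.reverse_reverse, pvFind_enumerate toks 0 t h]
  simp

theorem pvFirst_keys (toks : List String) :
    (pvFirst toks).keys = PySem.Set.ofList toks.reverse := by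
  unfold pvFirst
  rw [PySem.Dict.keys_foldl_insert_key (PySem.List.enumerate toks 0).reverse
    (fun p => p.2) (fun _ p => p.1) PySem.Dict.empty]
  simp [PySem.List.map_snd_enumerate, PySem.Set.update_nil_left]

theorem pvOfList_pairwise_idxOf (toks : List String) :
    (PySem.Set.ofList toks).Pairwise (fun a b => toks.idxOf a < toks.idxOf b) := by
  induction toks with
  | nil => simp [PySem.Set.ofList]
  | cons h t ih =>
    rw [PySem.Set.ofList_cons]
    constructor
    · intro b hb
      have hbne : b ≠ h := ((PySem.Set.mem_discard _ _ _).mp hb).2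
      rw [List.idxOf_cons_self, List.idxOf_cons_ne _ (Ne.symm hbne)]
      omega
    · have hsub : (PySem.Set.discard (PySem.Set.ofList t) h).Sublist (PySem.Set.ofList t) := by
        simp [PySem.Set.discard]
      refine ((ih.sublist hsub).imp_of_mem ?_)
      intro a b ha hb hlt
      have hane : a ≠ h := ((PySem.Set.mem_discard _ _ _).mp ha).2
      have hbne : b ≠ h := ((PySem.Set.mem_discard _ _ _).mp hb).2
      rw [List.idxOf_cons_ne _ (Ne.symm hane), List.idxOf_cons_ne _ (Ne.symm hbne)]
      omega

theorem pvOrdered_eq (toks : List String) :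
    PySem.List.sorted (pvFirst toks).keys (fun t => (pvFirst toks).getD t 0) false
      = PySem.Set.ofList toks := by
  apply PySem.List.sorted_eq_of_perm_of_pairwise_lt
  · rw [pvFirst_keys]
    refine (List.perm_ext_iff_of_nodup (PySem.Set.nodup_ofList _) (PySem.Set.nodup_ofList _)).mpr ?_
    intro x
    simp [PySem.Set.mem_ofList]
  · refine ((pvOfList_pairwise_idxOf toks).imp_of_mem ?_)
    intro a b ha hb hlt
    have ha' : a ∈ toks := (PySem.Set.mem_ofList _ _).mp ha
    have hb' : b ∈ toks := (PySem.Set.mem_ofList _ _).mp hb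
    rw [PySem.Dict.getD_of_get?_eq_some _ 0 (pvFirst_get? toks a ha'),
      PySem.Dict.getD_of_get?_eq_some _ 0 (pvFirst_get? toks b hb')]
    exact_mod_cast hlt

-- ===== VERDICT (by name: the statement is the Claim_ definition above) =====
theorem get_table_list_with_alias_spec : Claim_equal_get_table_list_with_alias := by
  intro path _
  simp only [Spec_get_table_list_with_alias, get_table_list_with_alias,
    get_table_list_with_alias_alt]
  simp only [pvInner_eq, pvOrdered_eq]
  rw [show ((PySem.Dict.empty : PySem.Dict String String),
      (PySem.Dict.empty : PySem.Dict String String), (1 : Int)) = pvState [] from rfl]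
  rw [PySem.List.foldl_pyRange_zero_pyGetD' path []
    (fun st row => row.foldl pvStep st) (pvState [])]
  rw [← List.foldl_flatten, pvFold_state, ← PySem.Set.ofList_eq_foldl]
  simp [pvState, List.flatMap_id']
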